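-- pv_equiv track=rewrite | github.com/DiaZa13/AED_Proyecto2 | Subrutinas.py | finalRecommendation
-- ===== SOURCE A (Python) =====
-- def finalRecommendation(recommendation):
--     unique = []
--     finalrecommendation = []
--     for x in recommendation:
--         if x not in unique:
--             unique.append(x)
--         else:
--             if x not in finalrecommendation:
--                 finalrecommendation.append(x)
--
--     return finalrecommendation
-- ===== SOURCE B (Python) =====
-- def finalRecommendation(recommendation):
--     return [x for i, x in enumerate(recommendation) if recommendation[:i].count(x) == 1]
-- ===== Notes on version B (the rewrite author's own statement) =====
-- stated objective: alternative
-- what changed: Replaces A's stateful loop over two accumulated lists (a 'seen' list and an 'already emitted' list) with a stateless position-based comprehension: keep element x at index i exactly when the prefix before i contains x exactly once (its second occurrence).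
import Mathlib
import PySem

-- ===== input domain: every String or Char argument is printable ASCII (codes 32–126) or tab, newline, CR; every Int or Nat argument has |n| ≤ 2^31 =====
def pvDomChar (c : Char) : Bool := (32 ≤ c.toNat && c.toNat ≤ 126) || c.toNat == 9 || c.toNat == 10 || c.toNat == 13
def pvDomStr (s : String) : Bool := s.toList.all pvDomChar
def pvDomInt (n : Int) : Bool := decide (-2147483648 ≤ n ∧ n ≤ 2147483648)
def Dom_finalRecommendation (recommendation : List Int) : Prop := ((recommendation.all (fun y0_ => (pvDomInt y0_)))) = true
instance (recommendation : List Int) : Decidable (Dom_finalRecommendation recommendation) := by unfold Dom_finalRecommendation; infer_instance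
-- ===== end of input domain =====

-- B replaces A's stateful loop over two accumulated lists with a stateless
-- comprehension keeping x at index i iff the prefix before i contains x exactly once (alternative, same cost).

-- ===== PORT A =====
def finalRecommendation (recommendation : List Int) : List Int :=
  (recommendation.foldl
    (fun (st : List Int × List Int) x =>
      if x ∉ st.1 then (st.1 ++ [x], st.2)
      else if x ∉ st.2 then (st.1, st.2 ++ [x])
      else (st.1, st.2))
    ([], [])).2

-- ===== PORT B =====
-- [x for i, x in enumerate(recommendation) if recommendation[:i].count(x) == 1]
def finalRecommendation_alt (recommendation : List Int) : List Int :=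
  ((PySem.List.enumerate recommendation 0).filter
    (fun p => PySem.List.count (PySem.List.slice recommendation none (some p.1)) p.2 == 1)).map
    (fun p => p.2)

-- ===== PRECONDITION & SPEC =====
def Spec_finalRecommendation (recommendation : List Int) (out : List Int) : Prop := out = finalRecommendation_alt recommendation
instance (recommendation : List Int) (out : List Int) : Decidable (Spec_finalRecommendation recommendation out) := by unfold Spec_finalRecommendation; infer_instance

-- ===== CLAIM (what is proved, stated in full; the proofs are below) =====
def Claim_equal_finalRecommendation : Prop := ∀ (recommendation : List Int), Dom_finalRecommendation recommendation → Spec_finalRecommendation recommendation (finalRecommendation recommendation)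

-- ===== LEMMAS AND PROOFS =====

theorem count_snoc (q : List Int) (x y : Int) :
    (q ++ [x]).count y = q.count y + (if y = x then 1 else 0) := by
  rw [List.count_append]
  by_cases h : y = x
  · subst h; simp
  · rw [if_neg h, List.count_eq_zero.mpr (show y ∉ [x] by simp [h])]

theorem alt_snoc (q : List Int) (x : Int) :
    finalRecommendation_alt (q ++ [x])
      = finalRecommendation_alt q ++ (if q.count x = 1 then [x] else []) := by
  unfold finalRecommendation_alt
  rw [PySem.List.enumerate_append, List.filter_append, List.map_append]
  congr 1
  · -- prefix part: conditions agree
    congr 1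
    apply List.filter_congr
    intro p hp
    obtain ⟨k, hk, rfl⟩ := (PySem.List.mem_enumerate_iff _ _ _).mp hp
    simp only [zero_add]
    rw [PySem.List.slice_to_natCast, PySem.List.slice_to_natCast,
        List.take_append_of_le_length (le_of_lt hk)]
  · -- the new last element
    rw [PySem.List.enumerate_cons, PySem.List.enumerate_nil, List.filter_singleton]
    simp only [zero_add]
    rw [PySem.List.slice_to_natCast, List.take_append_of_le_length (le_refl _), List.take_length,
        PySem.List.count_eq]
    by_cases h : q.count x = 1
    · simp [Bool.cond_eq_ite, h]
    · simp [Bool.cond_eq_ite, h]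

theorem alt_nil : finalRecommendation_alt [] = [] := rfl

theorem fr_inv (q : List Int) :
    (∀ y : Int, y ∈ ((q.foldl
        (fun (st : List Int × List Int) x =>
          if x ∉ st.1 then (st.1 ++ [x], st.2)
          else if x ∉ st.2 then (st.1, st.2 ++ [x])
          else (st.1, st.2))
        ([], [])).1) ↔ 1 ≤ q.count y) ∧
    (∀ y : Int, y ∈ ((q.foldl
        (fun (st : List Int × List Int) x =>
          if x ∉ st.1 then (st.1 ++ [x], st.2)
          else if x ∉ st.2 then (st.1, st.2 ++ [x])
          else (st.1, st.2))
        ([], [])).2) ↔ 2 ≤ q.count y) ∧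
    (q.foldl
        (fun (st : List Int × List Int) x =>
          if x ∉ st.1 then (st.1 ++ [x], st.2)
          else if x ∉ st.2 then (st.1, st.2 ++ [x])
          else (st.1, st.2))
        ([], [])).2 = finalRecommendation_alt q := by
  induction q using List.reverseRecOn with
  | nil => simp [alt_nil]
  | append_singleton q x ih =>
    obtain ⟨h1, h2, h3⟩ := ih
    rw [List.foldl_append]
    simp only [List.foldl_cons, List.foldl_nil]
    by_cases hu : x ∈ (q.foldl
        (fun (st : List Int × List Int) x =>
          if x ∉ st.1 then (st.1 ++ [x], st.2)
          else if x ∉ st.2 then (st.1, st.2 ++ [x])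
          else (st.1, st.2))
        ([], [])).1
    · by_cases hf : x ∈ (q.foldl
        (fun (st : List Int × List Int) x =>
          if x ∉ st.1 then (st.1 ++ [x], st.2)
          else if x ∉ st.2 then (st.1, st.2 ++ [x])
          else (st.1, st.2))
        ([], [])).2
      · -- already emitted: count x q ≥ 2
        have hc : 2 ≤ q.count x := (h2 x).mp hf
        rw [if_neg (not_not_intro hu), if_neg (not_not_intro hf), alt_snoc]
        rw [if_neg (by omega)]
        refine ⟨?_, ?_, by rw [h3, List.append_nil]⟩
        · intro y; rw [h1 y, count_snoc]
          by_cases hyx : y = x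
          · subst hyx; rw [if_pos rfl]; omega
          · rw [if_neg hyx]; omega
        · intro y; rw [h2 y, count_snoc]
          by_cases hyx : y = x
          · subst hyx; rw [if_pos rfl]; omega
          · rw [if_neg hyx]; omega
      · -- second occurrence: count x q = 1
        have hc1 : 1 ≤ q.count x := (h1 x).mp hu
        have hc2 : ¬ 2 ≤ q.count x := fun h => hf ((h2 x).mpr h)
        rw [if_neg (not_not_intro hu), if_pos hf, alt_snoc, if_pos (by omega)]
        refine ⟨?_, ?_, by rw [h3]⟩
        · intro y; rw [h1 y, count_snoc]
          by_cases hyx : y = x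
          · subst hyx; rw [if_pos rfl]; omega
          · rw [if_neg hyx]; omega
        · intro y
          simp only [List.mem_append, List.mem_singleton, h2 y]
          rw [count_snoc]
          by_cases hyx : y = x
          · subst hyx; rw [if_pos rfl]; omega
          · rw [if_neg hyx]; omega
    · -- first occurrence: count x q = 0
      have hc : ¬ 1 ≤ q.count x := fun h => hu ((h1 x).mpr h)
      rw [if_pos hu, alt_snoc, if_neg (by omega)]
      refine ⟨?_, ?_, by rw [h3, List.append_nil]⟩
      · intro y
        simp only [List.mem_append, List.mem_singleton, h1 y]
        rw [count_snoc]
        by_cases hyx : y = x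
        · subst hyx; rw [if_pos rfl]; omega
        · rw [if_neg hyx]; omega
      · intro y; rw [h2 y, count_snoc]
        by_cases hyx : y = x
        · subst hyx; rw [if_pos rfl]; omega
        · rw [if_neg hyx]; omega

-- ===== VERDICT (by name: the statement is the Claim_ definition above) =====
theorem finalRecommendation_spec : Claim_equal_finalRecommendation := by
  intro recommendation _
  unfold Spec_finalRecommendation finalRecommendation
  exact (fr_inv recommendation).2.2
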